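-- pv_equiv track=rewrite | github.com/TeodorArg/flatscanner-demo | src/repo_memory/reference_resolution.py | normalize_reference_candidate
-- ===== SOURCE A (Python) =====
-- def normalize_reference_candidate(candidate: str, allowed_paths: set[str]) -> str | None:
--     normalized = candidate.strip().strip("`'\"*.,:;!?()[]{}<>").replace("\\", "/")
--     if not normalized:
--         return None
--     if normalized in allowed_paths:
--         return normalized
--
--     for allowed_path in sorted(allowed_paths, key=len, reverse=True):
--         if normalized.endswith(f"/{allowed_path}"):
--             return allowed_path
--
--     return None
-- ===== SOURCE B (Python) =====
-- def normalize_reference_candidate(candidate, allowed_paths):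
--     normalized = candidate.strip().strip("`'\"*.,:;!?()[]{}<>").replace("\\", "/")
--     if not normalized:
--         return None
--     if normalized in allowed_paths:
--         return normalized
--     # scan the slash positions left to right: the first allowed suffix found
--     # is automatically the longest one, no sorting of allowed_paths needed
--     for i, ch in enumerate(normalized):
--         if ch == "/":
--             suffix = normalized[i + 1:]
--             if suffix in allowed_paths:
--                 return suffix
--     return None
-- ===== Notes on version B (the rewrite author's own statement) =====
-- stated objective: alternative
-- what changed: Instead of sorting all allowed paths by length and testing each with endswith, B enumerates the suffixes of the normalized string after each '/' (longest first) and looks each up in allowed_paths directly.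
import Mathlib
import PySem

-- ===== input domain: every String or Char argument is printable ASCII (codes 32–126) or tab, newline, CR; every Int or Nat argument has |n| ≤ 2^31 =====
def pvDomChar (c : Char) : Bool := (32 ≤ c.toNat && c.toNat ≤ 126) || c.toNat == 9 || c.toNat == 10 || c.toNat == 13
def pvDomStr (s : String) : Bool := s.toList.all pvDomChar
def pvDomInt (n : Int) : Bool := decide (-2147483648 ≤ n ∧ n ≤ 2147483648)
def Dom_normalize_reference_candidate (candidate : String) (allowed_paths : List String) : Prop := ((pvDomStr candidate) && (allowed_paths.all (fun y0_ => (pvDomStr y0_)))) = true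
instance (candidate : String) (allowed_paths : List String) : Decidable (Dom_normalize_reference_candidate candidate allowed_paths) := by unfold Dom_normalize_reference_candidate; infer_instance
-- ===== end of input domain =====

-- B replaces A's sort-all-allowed-paths-and-endswith scan by enumerating the suffixes of the
-- normalized string after each '/' and looking each up in allowed_paths directly (an alternative
-- algorithm that never iterates over allowed_paths); the return values are proved equal.

-- ===== PORT A =====
-- the for-loop of A: first element of the length-desc-sorted list that '/'-suffix-matches
def pvAFind (n : String) : List String → Option String
  | [] => none
  | p :: rest => if PySem.Str.endswith n ("/" ++ p) then some p else pvAFind n rest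

def normalize_reference_candidate (candidate : String) (allowed_paths : List String) : Option String :=
  let normalized := PySem.Str.replace (PySem.Str.stripChars (PySem.Str.strip candidate) "`'\"*.,:;!?()[]{}<>") "\\" "/"
  if normalized = "" then none
  else if normalized ∈ allowed_paths then some normalized
  else pvAFind normalized (PySem.List.sorted allowed_paths PySem.Str.len true)

-- ===== PORT B =====
-- the for-loop of B: scan `enumerate(normalized)`; at each '/', look the suffix up in allowed_paths.
-- `normalized[i+1:]` for an enumerate index 0 ≤ i < len(normalized) is exactly `drop (i+1)` (exact here).
def pvBScan (chars : List Char) (allowed : List String) : List (Int × Char) → Option String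
  | [] => none
  | (i, ch) :: rest =>
    if ch = '/' then
      let suffix := String.ofList (chars.drop (i.toNat + 1))
      if suffix ∈ allowed then some suffix else pvBScan chars allowed rest
    else pvBScan chars allowed rest

def normalize_reference_candidate_alt (candidate : String) (allowed_paths : List String) : Option String :=
  let normalized := PySem.Str.replace (PySem.Str.stripChars (PySem.Str.strip candidate) "`'\"*.,:;!?()[]{}<>") "\\" "/"
  if normalized = "" then none
  else if normalized ∈ allowed_paths then some normalized
  else pvBScan normalized.toList allowed_paths (PySem.List.enumerate normalized.toList 0)

-- ===== PRECONDITION & SPEC =====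
def Spec_normalize_reference_candidate (candidate : String) (allowed_paths : List String) (out : Option String) : Prop := out = normalize_reference_candidate_alt candidate allowed_paths
instance (candidate : String) (allowed_paths : List String) (out : Option String) : Decidable (Spec_normalize_reference_candidate candidate allowed_paths out) := by unfold Spec_normalize_reference_candidate; infer_instance

-- ===== CLAIM (what is proved, stated in full; the proofs are below) =====
def Claim_equal_normalize_reference_candidate : Prop := ∀ (candidate : String) (allowed_paths : List String), Dom_normalize_reference_candidate candidate allowed_paths → Spec_normalize_reference_candidate candidate allowed_paths (normalize_reference_candidate candidate allowed_paths)

-- ===== LEMMAS AND PROOFS =====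

theorem pv_endswith_slash (n p : String) :
    PySem.Str.endswith n ("/" ++ p) = true ↔ ('/' :: p.toList) <:+ n.toList := by
  rw [PySem.Str.endswith_eq, PySem.Chars.endswith_iff, String.toList_append,
    show ("/" : String).toList = ['/'] by decide]
  rfl

theorem pv_suffix_unique {l1 l2 cs : List Char} (h1 : l1 <:+ cs) (h2 : l2 <:+ cs)
    (h : l1.length = l2.length) : l1 = l2 := by
  rw [List.suffix_iff_eq_drop.mp h1, List.suffix_iff_eq_drop.mp h2, h]

theorem pv_suffix_slash_iff (cs t : List Char) :
    ('/' :: t) <:+ cs ↔ ∃ (k : Nat) (_ : k < cs.length), cs[k] = '/' ∧ cs.drop (k + 1) = t := by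
  constructor
  · intro h
    have hlen : t.length + 1 ≤ cs.length := by simpa using h.length_le
    have hdrop : '/' :: t = cs.drop (cs.length - (t.length + 1)) := by
      simpa using List.suffix_iff_eq_drop.mp h
    have hk : cs.length - (t.length + 1) < cs.length := by omega
    rw [List.drop_eq_getElem_cons hk] at hdrop
    exact ⟨cs.length - (t.length + 1), hk, ((List.cons.inj hdrop).1).symm,
      ((List.cons.inj hdrop).2).symm⟩
  · rintro ⟨k, hk, hc, hd⟩
    have h := List.drop_eq_getElem_cons hk (l := cs)
    rw [hc, hd] at h
    exact h ▸ List.drop_suffix k cs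

theorem pvA_none (n : String) (l : List String)
    (h : ∀ p ∈ l, ¬ ('/' :: p.toList) <:+ n.toList) : pvAFind n l = none := by
  induction l with
  | nil => rfl
  | cons p rest ih =>
    simp only [pvAFind]
    rw [if_neg (fun hc => h p (by simp) ((pv_endswith_slash n p).mp hc)),
      ih (fun q hq => h q (by simp [hq]))]

theorem pvA_some (n : String) (l : List String) (p : String) (h : pvAFind n l = some p) :
    p ∈ l ∧ ('/' :: p.toList) <:+ n.toList := by
  induction l with
  | nil => simp [pvAFind] at h
  | cons a rest ih =>
    simp only [pvAFind] at h
    split at h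
    · rename_i hc
      cases h
      exact ⟨by simp, (pv_endswith_slash n p).mp hc⟩
    · obtain ⟨h1, h2⟩ := ih h
      exact ⟨by simp [h1], h2⟩

theorem pvA_max (n q : String) (l : List String)
    (hp : l.Pairwise (fun a b => PySem.Str.len b ≤ PySem.Str.len a))
    (hm : q ∈ l) (hs : ('/' :: q.toList) <:+ n.toList) :
    ∃ p, pvAFind n l = some p ∧ q.toList.length ≤ p.toList.length := by
  induction l with
  | nil => cases hm
  | cons a rest ih =>
    by_cases ha : ('/' :: a.toList) <:+ n.toList
    · refine ⟨a, by simp only [pvAFind]; rw [if_pos ((pv_endswith_slash n a).mpr ha)], ?_⟩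
      rcases List.mem_cons.mp hm with rfl | hq
      · exact le_refl _
      · have := (List.pairwise_cons.mp hp).1 q hq
        simp only [PySem.Str.len_eq] at this
        exact_mod_cast this
    · have hq : q ∈ rest := by
        rcases List.mem_cons.mp hm with rfl | hq
        · exact absurd hs ha
        · exact hq
      obtain ⟨p, hfind, hlen⟩ := ih (List.pairwise_cons.mp hp).2 hq
      refine ⟨p, ?_, hlen⟩
      simp only [pvAFind]
      rw [if_neg (fun hc => ha ((pv_endswith_slash n a).mp hc))]
      exact hfind

theorem pvB_none (cs : List Char) (L : List String) (l : List (Int × Char))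
    (h : ∀ x ∈ l, ¬ (x.2 = '/' ∧ String.ofList (cs.drop (x.1.toNat + 1)) ∈ L)) :
    pvBScan cs L l = none := by
  induction l with
  | nil => rfl
  | cons x rest ih =>
    obtain ⟨i, ch⟩ := x
    have hx := h (i, ch) (by simp)
    simp only [pvBScan]
    split
    · rename_i hc
      rw [if_neg (fun hL => hx ⟨hc, hL⟩), ih (fun y hy => h y (by simp [hy]))]
    · exact ih (fun y hy => h y (by simp [hy]))

theorem pvB_some (cs : List Char) (L : List String) (l : List (Int × Char)) (p : String)
    (h : pvBScan cs L l = some p) :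
    ∃ x ∈ l, x.2 = '/' ∧ p = String.ofList (cs.drop (x.1.toNat + 1)) ∧ p ∈ L := by
  induction l with
  | nil => simp [pvBScan] at h
  | cons x rest ih =>
    obtain ⟨i, ch⟩ := x
    simp only [pvBScan] at h
    split at h
    · rename_i hc
      split at h
      · rename_i hL
        cases h
        exact ⟨(i, ch), by simp, hc, rfl, hL⟩
      · obtain ⟨y, hy, hrest⟩ := ih h
        exact ⟨y, by simp [hy], hrest⟩
    · obtain ⟨y, hy, hrest⟩ := ih h
      exact ⟨y, by simp [hy], hrest⟩

theorem pvB_max (cs : List Char) (L : List String) (l : List (Int × Char))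
    (hp : l.Pairwise (fun a b => a.1 < b.1)) (x : Int × Char) (hm : x ∈ l)
    (hc : x.2 = '/') (hL : String.ofList (cs.drop (x.1.toNat + 1)) ∈ L) :
    ∃ p, pvBScan cs L l = some p ∧ (cs.drop (x.1.toNat + 1)).length ≤ p.toList.length := by
  induction l with
  | nil => cases hm
  | cons y rest ih =>
    obtain ⟨i, ch⟩ := y
    by_cases h1 : ch = '/' ∧ String.ofList (cs.drop (i.toNat + 1)) ∈ L
    · refine ⟨String.ofList (cs.drop (i.toNat + 1)),
        by simp [pvBScan, h1.1, h1.2], ?_⟩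
      rw [String.toList_ofList]
      rcases List.mem_cons.mp hm with rfl | hx
      · exact le_refl _
      · have hlt : i < x.1 := (List.pairwise_cons.mp hp).1 x hx
        have : i.toNat ≤ x.1.toNat := Int.toNat_le_toNat (le_of_lt hlt)
        simp only [List.length_drop]
        omega
    · have hx : x ∈ rest := by
        rcases List.mem_cons.mp hm with rfl | hx
        · exact absurd ⟨hc, hL⟩ h1
        · exact hx
      obtain ⟨p, hfind, hlen⟩ := ih (List.pairwise_cons.mp hp).2 hx
      refine ⟨p, ?_, hlen⟩
      simp only [pvBScan]
      split
      · rename_i hch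
        rw [if_neg (fun hmem => h1 ⟨hch, hmem⟩), hfind]
      · exact hfind

-- the two loops compute the same value: each returns the longest p with p ∈ L and '/'++p a suffix
theorem pv_loops_eq (n : String) (L : List String) :
    pvAFind n (PySem.List.sorted L PySem.Str.len true) =
      pvBScan n.toList L (PySem.List.enumerate n.toList 0) := by
  by_cases hex : ∃ q ∈ L, ('/' :: q.toList) <:+ n.toList
  · obtain ⟨q, hqL, hqs⟩ := hex
    obtain ⟨pa, hA, -⟩ := pvA_max n q _ (PySem.List.sorted_pairwise_rev L _)
      ((PySem.List.mem_sorted L _ true q).mpr hqL) hqs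
    obtain ⟨k, hk, hkc, hkd⟩ := (pv_suffix_slash_iff n.toList q.toList).mp hqs
    have hmem : ((k : Int), n.toList[k]) ∈ PySem.List.enumerate n.toList 0 :=
      (PySem.List.mem_enumerate_iff _ _ _).mpr ⟨k, hk, by simp⟩
    obtain ⟨pb, hB, -⟩ := pvB_max n.toList L _ (PySem.List.pairwise_lt_enumerate _ _) _ hmem
      (by simpa using hkc) (by simpa [hkd] using hqL)
    rw [hA, hB]
    -- pa and pb are both in L, both '/'-suffixes, and each is at least as long as the other
    obtain ⟨hpaS, hpaSfx⟩ := pvA_some n _ pa hA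
    have hpaL : pa ∈ L := (PySem.List.mem_sorted L _ true pa).mp hpaS
    obtain ⟨x, hxmem, hx2, hpbeq, hpbL⟩ := pvB_some n.toList L _ pb hB
    obtain ⟨k', hk', hx'⟩ := (PySem.List.mem_enumerate_iff _ _ _).mp hxmem
    have hx1 : x.1 = (k' : Int) := by rw [hx']; simp
    have hx2' : x.2 = n.toList[k'] := by rw [hx']
    have hpbSfx : ('/' :: pb.toList) <:+ n.toList := by
      refine (pv_suffix_slash_iff n.toList pb.toList).mpr ⟨k', hk', ?_, ?_⟩
      · rw [← hx2', hx2]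
      · rw [hpbeq, String.toList_ofList, hx1, Int.toNat_natCast]
    obtain ⟨ka, hka, hkac, hkad⟩ := (pv_suffix_slash_iff n.toList pa.toList).mp hpaSfx
    have hmem_a : ((ka : Int), n.toList[ka]) ∈ PySem.List.enumerate n.toList 0 :=
      (PySem.List.mem_enumerate_iff _ _ _).mpr ⟨ka, hka, by simp⟩
    obtain ⟨pb', hB', hlen1⟩ := pvB_max n.toList L _ (PySem.List.pairwise_lt_enumerate _ _) _
      hmem_a (by simpa using hkac)
      (by simp only [Int.toNat_natCast]; rw [hkad]; simpa using hpaL)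
    rw [hB] at hB'
    cases hB'
    obtain ⟨pa', hA', hlen2⟩ := pvA_max n pb _ (PySem.List.sorted_pairwise_rev L _)
      ((PySem.List.mem_sorted L _ true pb).mpr hpbL) hpbSfx
    rw [hA] at hA'
    cases hA'
    have hlen1' : pa.toList.length ≤ pb.toList.length := by
      have h' : (n.toList.drop (ka + 1)).length ≤ pb.toList.length := by simpa using hlen1
      rwa [hkad] at h'
    have heq : ('/' :: pa.toList) = ('/' :: pb.toList) :=
      pv_suffix_unique hpaSfx hpbSfx (by simp only [List.length_cons]; omega)
    exact congrArg some (String.toList_inj.mp (List.cons.inj heq).2)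
  · have hex' : ∀ q, q ∈ L → ¬ ('/' :: q.toList) <:+ n.toList :=
      fun q hq hs => hex ⟨q, hq, hs⟩
    rw [pvA_none, pvB_none]
    · rintro x hx ⟨hc, hL⟩
      obtain ⟨k, hk, hxk⟩ := (PySem.List.mem_enumerate_iff _ _ _).mp hx
      have hx1 : x.1.toNat = k := by rw [hxk]; simp
      have hx2 : x.2 = n.toList[k] := by rw [hxk]
      rw [hx1] at hL
      refine hex' _ hL ?_
      rw [String.toList_ofList]
      exact (pv_suffix_slash_iff n.toList _).mpr ⟨k, hk, by rw [← hx2, hc], rfl⟩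
    · intro p hp
      exact hex' p ((PySem.List.mem_sorted L _ true p).mp hp)

-- ===== VERDICT (by name: the statement is the Claim_ definition above) =====
theorem normalize_reference_candidate_spec : Claim_equal_normalize_reference_candidate := by
  intro candidate allowed_paths _
  unfold Spec_normalize_reference_candidate normalize_reference_candidate normalize_reference_candidate_alt
  simp only []
  split_ifs
  · rfl
  · rfl
  · exact pv_loops_eq _ allowed_paths
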